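-- pv_equiv track=rewrite | github.com/nepenth/Agentic-HomeLab | Agentic-Backend/app/services/vision_ai_service.py | _parse_object_detection
-- ===== SOURCE A (Python) =====
-- from typing import Dict, Any, List, Optional, Union
--
-- def _parse_object_detection(description: str) -> List[Dict[str, Any]]:
--     """Parse object detection results from model response."""
--     # This is a simple parser - in production, you might want more sophisticated parsing
--     objects = []
--
--     lines = description.split('\n')
--     current_object = {}
--
--     for line in lines:
--         line = line.strip()
--         if not line:
--             if current_object:
--                 objects.append(current_object)
--                 current_object = {}
--             continue
--
--         # Try to extract object information
--         if ':' in line: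
--             key, value = line.split(':', 1)
--             key = key.strip().lower()
--             value = value.strip()
--
--             if 'name' in key or 'object' in key:
--                 current_object['name'] = value
--             elif 'location' in key or 'position' in key:
--                 current_object['location'] = value
--             elif 'confidence' in key:
--                 current_object['confidence'] = value
--
--     if current_object:
--         objects.append(current_object)
--
--     return objects
-- ===== SOURCE B (Python) =====
-- from typing import Dict, Any, List, Optional, Union
--
-- def _parse_object_detection(description: str) -> List[Dict[str, Any]]:
--     """Parse object detection results: strip lines, split into blank-separated
--     blocks with an index scan, then parse each block with a table-driven
--     classifier; keep the non-empty dicts."""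
--     FIELDS = [("name", ("name", "object")),
--               ("location", ("location", "position")),
--               ("confidence", ("confidence",))]
--
--     def classify(line):
--         if ':' not in line:
--             return None
--         key, value = line.split(':', 1)
--         key = key.strip().lower()
--         for field, keywords in FIELDS:
--             if any(kw in key for kw in keywords):
--                 return field, value.strip()
--         return None
--
--     def parse_block(block):
--         obj = {}
--         for line in block:
--             hit = classify(line)
--             if hit is not None:
--                 obj[hit[0]] = hit[1]
--         return obj
--
--     lines = [raw.strip() for raw in description.split('\n')]
--     n = len(lines)
--     blocks = []
--     i = 0
--     while i < n:
--         if lines[i]: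
--             j = i
--             while j < n and lines[j]:
--                 j += 1
--             blocks.append(lines[i:j])
--             i = j + 1
--         else:
--             i += 1
--
--     parsed = [parse_block(b) for b in blocks]
--     return [obj for obj in parsed if obj]
-- ===== Notes on version B (the rewrite author's own statement) =====
-- stated objective: alternative
-- what changed: Replaces A's single stateful scan (flushing a current dict on blank lines, with an inline if-elif key chain) with a staged pipeline: strip all lines, split them into blank-separated blocks by an index scan, parse each block with a table-driven keyword classifier, and filter out the empty dicts.
import Mathlib
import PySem

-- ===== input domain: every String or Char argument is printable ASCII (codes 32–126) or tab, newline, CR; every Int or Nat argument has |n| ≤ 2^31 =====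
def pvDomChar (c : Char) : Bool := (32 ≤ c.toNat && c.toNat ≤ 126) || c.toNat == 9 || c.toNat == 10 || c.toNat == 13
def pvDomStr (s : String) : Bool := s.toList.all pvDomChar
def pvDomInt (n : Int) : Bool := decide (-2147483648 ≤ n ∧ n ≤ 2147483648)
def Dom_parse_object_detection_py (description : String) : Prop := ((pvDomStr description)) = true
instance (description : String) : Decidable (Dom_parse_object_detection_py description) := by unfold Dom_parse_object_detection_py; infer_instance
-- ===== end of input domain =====

-- B replaces A's single stateful scan with a staged pipeline (strip lines, index-scan into
-- blank-separated blocks, table-driven classifier per block, filter empty dicts): an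
-- alternative decomposition, same cost.

-- ===== PORT A =====
-- one iteration of A's loop; state = (objects so far, current_object)
def pdStepA (st : List (PySem.Dict String String) × PySem.Dict String String) (rawline : String) :
    List (PySem.Dict String String) × PySem.Dict String String :=
  let line := PySem.Str.strip rawline
  if line = "" then
    if st.2.items ≠ [] then (st.1 ++ [st.2], PySem.Dict.empty) else st
  else
    -- objects is untouched here; current_object is updated in place
    (st.1,
      if PySem.Str.isIn ":" line then
        match (PySem.Str.splitMax? line ":" 1).getD [] with
        | k :: v :: _ =>
            let key := PySem.Str.lower (PySem.Str.strip k)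
            let value := PySem.Str.strip v
            if PySem.Str.isIn "name" key || PySem.Str.isIn "object" key then
              st.2.insert "name" value
            else if PySem.Str.isIn "location" key || PySem.Str.isIn "position" key then
              st.2.insert "location" value
            else if PySem.Str.isIn "confidence" key then
              st.2.insert "confidence" value
            else st.2
        | _ => st.2          -- unreachable: ':' in line guarantees two parts
      else st.2)

def parse_object_detection_py (description : String) : List (List (String × String)) :=
  let lines := (PySem.Str.split? description "\n").getD []
  let st := lines.foldl pdStepA ([], PySem.Dict.empty)
  let objects := if st.2.items ≠ [] then st.1 ++ [st.2] else st.1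
  objects.map (·.items)

-- ===== PORT B =====
-- the keyword table FIELDS of Source B
def pdFields : List (String × List String) :=
  [("name", ["name", "object"]),
   ("location", ["location", "position"]),
   ("confidence", ["confidence"])]

-- classify(line): which field (if any) a line assigns, and its value
def pdClassify (line : String) : Option (String × String) :=
  if PySem.Str.isIn ":" line then
    match (PySem.Str.splitMax? line ":" 1).getD [] with
    | k :: v :: _ =>
        let key := PySem.Str.lower (PySem.Str.strip k)
        match pdFields.find? (fun p => p.2.any (fun kw => PySem.Str.isIn kw key)) with
        | some p => some (p.1, PySem.Str.strip v)
        | none => none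
    | _ => none          -- unreachable: ':' in line guarantees two parts
  else none

-- parse_block(block)
def pdParseBlock (block : List String) : PySem.Dict String String :=
  block.foldl (fun obj line =>
    match pdClassify line with
    | some hit => obj.insert hit.1 hit.2
    | none => obj) PySem.Dict.empty

-- the inner while loop: collect stripped lines up to the next blank; returns (run, rest after the blank)
def pdTakeBlock : List String → List String × List String
  | [] => ([], [])
  | l :: ls => if l = "" then ([], ls) else ((l :: (pdTakeBlock ls).1), (pdTakeBlock ls).2)

lemma pdTakeBlock_rest_le : ∀ ls : List String, (pdTakeBlock ls).2.length ≤ ls.length := by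
  intro ls
  induction ls with
  | nil => simp [pdTakeBlock]
  | cons l ls ih =>
      simp only [pdTakeBlock]
      split_ifs <;> simp <;> omega

-- the outer while loop: skip blanks, collect maximal runs of non-empty lines
def pdSplitBlocks : List String → List (List String)
  | [] => []
  | l :: ls =>
      if l = "" then pdSplitBlocks ls
      else (l :: (pdTakeBlock ls).1) :: pdSplitBlocks (pdTakeBlock ls).2
termination_by ls => ls.length
decreasing_by
  all_goals (have := pdTakeBlock_rest_le ls; simp only [List.length_cons]; omega)

def parse_object_detection_py_alt (description : String) : List (List (String × String)) :=
  let lines := ((PySem.Str.split? description "\n").getD []).map PySem.Str.strip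
  let blocks := pdSplitBlocks lines
  let parsed := blocks.map pdParseBlock
  (parsed.filter (fun obj => !obj.items.isEmpty)).map (·.items)

-- ===== PRECONDITION & SPEC =====
def Spec_parse_object_detection_py (description : String) (out : List (List (String × String))) : Prop := out = parse_object_detection_py_alt description
instance (description : String) (out : List (List (String × String))) : Decidable (Spec_parse_object_detection_py description out) := by unfold Spec_parse_object_detection_py; infer_instance

-- ===== CLAIM (what is proved, stated in full; the proofs are below) =====
def Claim_equal_parse_object_detection_py : Prop := ∀ (description : String), Dom_parse_object_detection_py description → Spec_parse_object_detection_py description (parse_object_detection_py description)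

-- ===== LEMMAS AND PROOFS =====

-- proof-only: grouping step on an already-stripped line; state = (blocks, current run)
def pdGStep (st : List (List String) × List String) (s : String) :
    List (List String) × List String :=
  if s ≠ "" then (st.1, st.2 ++ [s])
  else if st.2 ≠ [] then (st.1 ++ [st.2], []) else st

-- final flush of the grouping state
def pdFlushG (g : List (List String) × List String) : List (List String) :=
  if g.2 ≠ [] then g.1 ++ [g.2] else g.1

-- processing a block list the B way
def pdProc (blocks : List (List String)) : List (List (String × String)) :=
  ((blocks.map pdParseBlock).filter (fun obj => !obj.items.isEmpty)).map (·.items)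

-- A's final flush + conversion to item lists
def pdFinA (st : List (PySem.Dict String String) × PySem.Dict String String) :
    List (List (String × String)) :=
  (if st.2.items ≠ [] then st.1 ++ [st.2] else st.1).map (·.items)

-- B's classifier-based dict update, one line
def pdStepB (obj : PySem.Dict String String) (line : String) : PySem.Dict String String :=
  match pdClassify line with
  | some hit => obj.insert hit.1 hit.2
  | none => obj

lemma pdProc_append (a b : List (List String)) : pdProc (a ++ b) = pdProc a ++ pdProc b := by
  simp [pdProc]

lemma pdProc_single (b : List String) :
    pdProc [b] = if (pdParseBlock b).items ≠ [] then [(pdParseBlock b).items] else [] := by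
  by_cases h : (pdParseBlock b).items = [] <;>
    simp [pdProc, List.isEmpty_iff, h]

-- pass-1 fold: already-finished blocks pass through as a prefix
lemma pdGStep_prefix (ss : List String) (blocks : List (List String)) (cur : List String) :
    ss.foldl pdGStep (blocks, cur)
    = (blocks ++ (ss.foldl pdGStep ([], cur)).1, (ss.foldl pdGStep ([], cur)).2) := by
  induction ss generalizing blocks cur with
  | nil => simp
  | cons s ss ih =>
      simp only [List.foldl_cons, pdGStep]
      split_ifs with h1 h2
      · exact ih blocks _
      · rw [ih (blocks ++ [cur]) [], ih ([] ++ [cur]) []]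
        simp
      · exact ih blocks cur

-- B's final pipeline applied after the grouping fold, as a function
def pdFinG (g : List (List String) × List String) : List (List (String × String)) :=
  pdProc (pdFlushG g)

lemma pdFinG_prefix (ss : List String) (blocks : List (List String)) (cur : List String) :
    pdFinG (ss.foldl pdGStep (blocks, cur))
    = pdProc blocks ++ pdFinG (ss.foldl pdGStep ([], cur)) := by
  rw [pdGStep_prefix]
  unfold pdFinG pdFlushG
  split_ifs with h
  · rw [List.append_assoc, pdProc_append]
  · rw [pdProc_append]

-- the grouping fold, flushed, computes exactly B's recursive block splitter
lemma pdGfold_split (ss : List String) (cur : List String) :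
    pdFlushG (ss.foldl pdGStep ([], cur))
    = if cur = [] then pdSplitBlocks ss
      else (cur ++ (pdTakeBlock ss).1) :: pdSplitBlocks (pdTakeBlock ss).2 := by
  induction ss generalizing cur with
  | nil =>
      simp only [List.foldl_nil, pdFlushG, pdTakeBlock]
      split_ifs with h1 h2 <;> simp_all [pdSplitBlocks]
  | cons s ss ih =>
      by_cases hs : s = ""
      · subst hs
        by_cases hc : cur = []
        · subst hc
          simp only [List.foldl_cons, pdGStep, pdSplitBlocks]
          simpa using ih []
        · simp only [List.foldl_cons,
            show pdGStep ([], cur) "" = ([cur], []) by simp [pdGStep, hc]]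
          rw [show pdFlushG (ss.foldl pdGStep ([cur], [])) =
              [cur] ++ pdFlushG (ss.foldl pdGStep ([], [])) by
              rw [pdGStep_prefix]; unfold pdFlushG; split_ifs <;> simp]
          rw [ih []]
          simp [hc, pdTakeBlock]
      · simp only [List.foldl_cons,
          show pdGStep ([], cur) s = ([], cur ++ [s]) by simp [pdGStep, hs]]
        rw [ih (cur ++ [s])]
        by_cases hc : cur = []
        · simp [hc, pdSplitBlocks, hs, pdTakeBlock]
        · simp [hc, pdTakeBlock, hs]

-- A's key/value if-chain is B's table-driven classifier
-- the table lookup of Source B, written out as A's if-elif chain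
lemma pdFind_chain (key : String) :
    pdFields.find? (fun p => p.2.any (fun kw => PySem.Str.isIn kw key)) =
    (if PySem.Str.isIn "name" key || PySem.Str.isIn "object" key then
       some ("name", ["name", "object"])
     else if PySem.Str.isIn "location" key || PySem.Str.isIn "position" key then
       some ("location", ["location", "position"])
     else if PySem.Str.isIn "confidence" key then
       some ("confidence", ["confidence"])
     else none) := by
  cases h1 : PySem.Chars.isIn ['n','a','m','e'] key.toList <;>
  cases h2 : PySem.Chars.isIn ['o','b','j','e','c','t'] key.toList <;>
  cases h3 : PySem.Chars.isIn ['l','o','c','a','t','i','o','n'] key.toList <;>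
  cases h4 : PySem.Chars.isIn ['p','o','s','i','t','i','o','n'] key.toList <;>
  cases h5 : PySem.Chars.isIn ['c','o','n','f','i','d','e','n','c','e'] key.toList <;>
    simp [pdFields, h1, h2, h3, h4, h5]

lemma pdStepA_nonblank (st : List (PySem.Dict String String) × PySem.Dict String String)
    (raw : String) (h : ¬ PySem.Str.strip raw = "") :
    pdStepA st raw = (st.1, pdStepB st.2 (PySem.Str.strip raw)) := by
  unfold pdStepA pdStepB pdClassify
  rw [if_neg h]
  by_cases hin : PySem.Str.isIn ":" (PySem.Str.strip raw) = true
  · rw [if_pos hin, if_pos hin]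
    rcases (PySem.Str.splitMax? (PySem.Str.strip raw) ":" 1).getD [] with _ | ⟨k, _ | ⟨v, rest⟩⟩
    · rfl
    · rfl
    · dsimp only
      rw [pdFind_chain]
      split_ifs <;> rfl
  · rw [if_neg hin, if_neg hin]

lemma pdParseBlock_snoc (cur : List String) (s : String) :
    pdParseBlock (cur ++ [s]) = pdStepB (pdParseBlock cur) s := by
  simp [pdParseBlock, pdStepB]

-- a dict with no items is the empty dict
lemma pdDict_empty_of_items_nil (d : PySem.Dict String String) (h : d.items = []) :
    d = PySem.Dict.empty := by
  apply PySem.Dict.ext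
  simpa using h

-- main invariant: A's flush-as-you-go scan started at (objs, dict-of-cur) equals
-- objs followed by B's group-then-parse pipeline continued from current run cur
lemma pdMain (ls : List String) (objs : List (PySem.Dict String String)) (cur : List String) :
    pdFinA (ls.foldl pdStepA (objs, pdParseBlock cur))
    = objs.map (·.items) ++ pdFinG ((ls.map PySem.Str.strip).foldl pdGStep ([], cur)) := by
  induction ls generalizing objs cur with
  | nil =>
      simp only [List.foldl_nil, List.map_nil, pdFinA, pdFinG, pdFlushG]
      by_cases h : (pdParseBlock cur).items = []
      · by_cases hcur : cur = []
        · subst hcur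
          simp [h, pdProc]
        · simp [h, hcur, pdProc_single]
      · have hcur : cur ≠ [] := by
          intro hc; rw [hc] at h; exact h rfl
        simp [h, hcur, pdProc_single]
  | cons l ls ih =>
      by_cases hb : PySem.Str.strip l = ""
      · simp only [List.foldl_cons, List.map_cons]
        by_cases h : (pdParseBlock cur).items = []
        · -- current dict empty: A keeps its state; B's run (if any) parses to nothing
          have he : pdParseBlock cur = PySem.Dict.empty := pdDict_empty_of_items_nil _ h
          have hA : pdStepA (objs, pdParseBlock cur) l = (objs, pdParseBlock []) := by
            rw [show pdParseBlock ([] : List String) = PySem.Dict.empty from rfl]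
            simp [pdStepA, hb, he, PySem.Dict.empty]
          rw [hA]
          by_cases hcur : cur = []
          · rw [show pdGStep ([], cur) (PySem.Str.strip l) = ([], ([] : List String)) by
              simp [pdGStep, hb, hcur]]
            exact ih objs []
          · rw [show pdGStep ([], cur) (PySem.Str.strip l) = ([cur], ([] : List String)) by
              simp [pdGStep, hb, hcur]]
            rw [pdFinG_prefix, pdProc_single, ih objs []]
            simp [h]
        · -- current dict non-empty: A flushes it; B closes the run
          have hcur : cur ≠ [] := by intro hc; rw [hc] at h; exact h rfl
          have hA : pdStepA (objs, pdParseBlock cur) l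
              = (objs ++ [pdParseBlock cur], pdParseBlock []) := by
            rw [show pdParseBlock ([] : List String) = PySem.Dict.empty from rfl]
            simp [pdStepA, hb, h]
          rw [hA,
            show pdGStep ([], cur) (PySem.Str.strip l) = ([cur], ([] : List String)) by
              simp [pdGStep, hb, hcur],
            pdFinG_prefix, pdProc_single, ih (objs ++ [pdParseBlock cur]) []]
          simp [h]
      · -- non-blank line: both sides extend the current run / dict
        simp only [List.foldl_cons, List.map_cons]
        rw [pdStepA_nonblank _ _ hb, ← pdParseBlock_snoc,
          show pdGStep ([], cur) (PySem.Str.strip l) = ([], cur ++ [PySem.Str.strip l]) by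
            simp [pdGStep, hb]]
        exact ih objs (cur ++ [PySem.Str.strip l])

-- ===== VERDICT (by name: the statement is the Claim_ definition above) =====
theorem parse_object_detection_py_spec : Claim_equal_parse_object_detection_py := by
  intro description _
  show _ = _
  have h := pdMain ((PySem.Str.split? description "\n").getD []) [] []
  simp only [List.map_nil, List.nil_append] at h
  calc parse_object_detection_py description
      = pdFinA (((PySem.Str.split? description "\n").getD []).foldl pdStepA
          ([], pdParseBlock [])) := rfl
    _ = pdFinG ((((PySem.Str.split? description "\n").getD []).map PySem.Str.strip).foldl
          pdGStep ([], [])) := h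
    _ = pdProc (pdSplitBlocks (((PySem.Str.split? description "\n").getD []).map
          PySem.Str.strip)) := by
          rw [pdFinG, pdGfold_split]; simp
    _ = parse_object_detection_py_alt description := rfl
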